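-- pv_equiv track=rewrite | github.com/sizhen/MSA_SAT | util.py | multi_seqs_to_vertex_cover
-- ===== SOURCE A (Python) =====
-- def multi_seqs_to_vertex_cover(seqs):
--     # seqs: a list of strings
--     nodes = set()
--     edges = []
--     for seq in seqs:
--         if not seq: continue
--         left_node  = 0
--         right_node = 0
--         pos = 0
--         for item in seq:
--             if pos == 0:   # left vertex
--                 if item == '0': left_node += 1
--                 else: pos += 1
--             elif pos == 1: # right vertex
--                 if item == '0': right_node += 1
--                 else: pos += 1
--             else:
--                 assert item == '0'
--
--         nodes.add(left_node)
--         nodes.add(left_node + right_node + 1)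
--         # if right_node > 0:
--         edges.append((left_node, left_node + right_node + 1))
--
--     num_nodes = max(nodes) + 1
--
--     char_nodes = []
--     for i in range(num_nodes):
--         # char_nodes.append(chr(i + ord('a')))
--         char_nodes.append("%d" % i)
--
--     return char_nodes, edges
-- ===== SOURCE B (Python) =====
-- def multi_seqs_to_vertex_cover(seqs):
--     # seqs: a list of strings
--     edges = []
--     for seq in seqs:
--         if not seq:
--             continue
--         rest = seq.lstrip('0')
--         left_node = len(seq) - len(rest)
--         if rest:
--             tail = rest[1:].lstrip('0')
--             right_node = len(rest) - 1 - len(tail)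
--             if tail:
--                 assert tail[1:].lstrip('0') == ''
--         else:
--             right_node = 0
--         edges.append((left_node, left_node + right_node + 1))
--     num_nodes = max(r for _, r in edges) + 1
--     return [str(i) for i in range(num_nodes)], edges
-- ===== Notes on version B (the rewrite author's own statement) =====
-- stated objective: idiomatic
-- what changed: Replaces the char-by-char three-state machine and the running node set with lstrip('0')-based segmentation of each sequence plus deriving num_nodes from the maximum edge endpoint, and builds char_nodes by a comprehension.
import Mathlib
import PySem

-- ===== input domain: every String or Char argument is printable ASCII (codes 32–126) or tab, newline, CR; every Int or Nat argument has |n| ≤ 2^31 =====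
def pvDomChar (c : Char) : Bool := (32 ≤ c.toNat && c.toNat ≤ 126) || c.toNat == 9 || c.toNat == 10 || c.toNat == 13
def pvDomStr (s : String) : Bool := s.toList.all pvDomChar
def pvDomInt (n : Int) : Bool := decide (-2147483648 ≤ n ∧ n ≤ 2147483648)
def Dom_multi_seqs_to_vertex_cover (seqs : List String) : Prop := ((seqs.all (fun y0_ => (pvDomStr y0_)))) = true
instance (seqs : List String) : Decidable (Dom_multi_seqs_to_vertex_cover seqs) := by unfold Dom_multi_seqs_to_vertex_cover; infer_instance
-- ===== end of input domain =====

-- B replaces A's char-by-char three-state machine and running node set by lstrip-style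
-- segmentation of each sequence and a max over edge endpoints (idiomatic; same cost).


-- ===== PORT A =====
-- A's inner character loop, state (left_node, right_node, pos)
def mvcStepA : (Int × Int × Int) → Char → (Int × Int × Int) :=
  fun st c =>
    if st.2.2 == 0 then
      (if c == '0' then (st.1 + 1, st.2.1, st.2.2) else (st.1, st.2.1, st.2.2 + 1))
    else if st.2.2 == 1 then
      (if c == '0' then (st.1, st.2.1 + 1, st.2.2) else (st.1, st.2.1, st.2.2 + 1))
    else st  -- 'assert item == "0"': AssertionError inputs are excluded by Pre_

-- A's outer loop over seqs, state (nodes : set, edges)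
def mvcFoldA : (PySem.Set Int × List (Int × Int)) → String → (PySem.Set Int × List (Int × Int)) :=
  fun st seq =>
    if seq.toList = [] then st
    else
      let p := seq.toList.foldl mvcStepA (0, 0, 0)
      (PySem.Set.add (PySem.Set.add st.1 p.1) (p.1 + p.2.1 + 1),
       st.2 ++ [(p.1, p.1 + p.2.1 + 1)])

def multi_seqs_to_vertex_cover (seqs : List String) : List String × (List (Int × Int)) :=
  let st := seqs.foldl mvcFoldA (PySem.Set.empty, [])
  -- 'max(nodes)' raises ValueError on an empty set: such inputs are excluded by Pre_
  let numNodes := (PySem.List.max? st.1 (fun v => v)).getD 0 + 1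
  let charNodes := (PySem.List.pyRange 0 numNodes 1).foldl
    (fun acc i => acc ++ [PySem.Int.toStr i]) []
  (charNodes, st.2)

-- ===== PORT B =====
-- B's segmentation of one sequence (lstrip('0') ported, exactly, as dropWhile (· == '0')):
-- returns (left_node, right_node)
def mvcSeg (cs : List Char) : Int × Int :=
  let rest := cs.dropWhile (· == '0')
  let left : Int := (cs.length : Int) - (rest.length : Int)
  match rest with
  | [] => (left, 0)
  | _ :: t =>
      -- 'assert tail[1:].lstrip("0") == ""': AssertionError inputs are excluded by Pre_
      let tail := t.dropWhile (· == '0')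
      (left, (t.length : Int) - (tail.length : Int))

def mvcFoldB : List (Int × Int) → String → List (Int × Int) :=
  fun edges seq =>
    if seq.toList = [] then edges
    else
      let p := mvcSeg seq.toList
      edges ++ [(p.1, p.1 + p.2 + 1)]

def multi_seqs_to_vertex_cover_alt (seqs : List String) : List String × (List (Int × Int)) :=
  let edges := seqs.foldl mvcFoldB []
  -- 'max' over an empty generator raises ValueError: such inputs are excluded by Pre_
  let numNodes := (PySem.List.max? (edges.map (fun p => p.2)) (fun v => v)).getD 0 + 1
  ((PySem.List.pyRange 0 numNodes 1).map PySem.Int.toStr, edges)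

-- ===== PRECONDITION & SPEC =====
-- Pre_ excludes exactly the inputs where Python A raises: all sequences empty (ValueError
-- from max over an empty node set) or some sequence whose third non-'0' character trips
-- the assert (AssertionError); B raises the same exceptions there.
def Pre_multi_seqs_to_vertex_cover (seqs : List String) : Prop :=
  (∃ s ∈ seqs, s.toList ≠ []) ∧
  ∀ s ∈ seqs, (s.toList.filter (fun c => c ≠ '0')).length ≤ 2
instance (seqs : List String) : Decidable (Pre_multi_seqs_to_vertex_cover seqs) := by
  unfold Pre_multi_seqs_to_vertex_cover; infer_instance

def pvWitness_multi_seqs_to_vertex_cover : List String := ["001000100", "1", "0010"]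

def Spec_multi_seqs_to_vertex_cover (seqs : List String) (out : List String × (List (Int × Int))) : Prop := out = multi_seqs_to_vertex_cover_alt seqs
instance (seqs : List String) (out : List String × (List (Int × Int))) : Decidable (Spec_multi_seqs_to_vertex_cover seqs out) := by unfold Spec_multi_seqs_to_vertex_cover; infer_instance

-- ===== CLAIM (what is proved, stated in full; the proofs are below) =====
def Claim_equal_multi_seqs_to_vertex_cover : Prop := ∀ (seqs : List String), Dom_multi_seqs_to_vertex_cover seqs → Pre_multi_seqs_to_vertex_cover seqs → Spec_multi_seqs_to_vertex_cover seqs (multi_seqs_to_vertex_cover seqs)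

-- ===== LEMMAS AND PROOFS =====

-- prepending a '0' increments left_node and keeps right_node
theorem mvcSeg_cons_zero (t : List Char) :
    mvcSeg ('0' :: t) = ((mvcSeg t).1 + 1, (mvcSeg t).2) := by
  have hle : ((t.dropWhile (· == '0')).length : Int) ≤ (t.length : Int) := by
    exact_mod_cast t.length_dropWhile_le (· == '0')
  simp only [mvcSeg, List.dropWhile_cons]
  norm_num
  cases hrest : t.dropWhile (· == '0') with
  | nil => simp
  | cons a u =>
      refine Prod.ext ?_ rfl
      push_cast
      ring

-- a leading separator makes left_node = 0 and counts the zeros after it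
theorem mvcSeg_cons_sep (c : Char) (t : List Char) (hb : (c == '0') = false) :
    mvcSeg (c :: t) = (0, (t.length : Int) - ((t.dropWhile (· == '0')).length : Int)) := by
  simp [mvcSeg, hb]

-- A's state machine in pos = 2 never changes state
theorem mvcStepA_pos2 (cs : List Char) (l r : Int) :
    cs.foldl mvcStepA (l, r, 2) = (l, r, 2) := by
  induction cs with
  | nil => rfl
  | cons c t ih => simpa [mvcStepA] using ih

-- A's state machine from pos = 1 counts the zeros up to the next separator
theorem mvcStepA_pos1 (cs : List Char) (l r : Int) :
    (cs.foldl mvcStepA (l, r, 1)).1 = l ∧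
    (cs.foldl mvcStepA (l, r, 1)).2.1 =
      r + ((cs.length : Int) - ((cs.dropWhile (· == '0')).length : Int)) := by
  induction cs generalizing r with
  | nil => simp
  | cons c t ih =>
    by_cases hc : c = '0'
    · subst hc
      have h := ih (r + 1)
      simp only [List.foldl_cons, mvcStepA]
      norm_num
      have hle : ((t.dropWhile (· == '0')).length : Int) ≤ (t.length : Int) := by
        exact_mod_cast t.length_dropWhile_le (· == '0')
      refine ⟨h.1, ?_⟩
      rw [h.2]; ring
    · have hb : (c == '0') = false := by simp [hc]
      simp only [List.foldl_cons, mvcStepA, hb]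
      norm_num
      rw [mvcStepA_pos2]
      simp [hb]

-- A's state machine from pos = 0 computes exactly B's segmentation
theorem mvcStepA_seg (cs : List Char) (l : Int) :
    (cs.foldl mvcStepA (l, 0, 0)).1 = l + (mvcSeg cs).1 ∧
    (cs.foldl mvcStepA (l, 0, 0)).2.1 = (mvcSeg cs).2 := by
  induction cs generalizing l with
  | nil => simp [mvcSeg]
  | cons c t ih =>
    by_cases hc : c = '0'
    · subst hc
      simp only [List.foldl_cons, mvcStepA]
      norm_num
      rcases ih (l + 1) with ⟨h1, h2⟩
      rw [mvcSeg_cons_zero]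
      refine ⟨by rw [h1]; ring, h2⟩
    · have hb : (c == '0') = false := by simp [hc]
      simp only [List.foldl_cons, mvcStepA, hb]
      norm_num
      rw [mvcSeg_cons_sep c t hb]
      have h := mvcStepA_pos1 t l 0
      simpa using h

-- one outer A-step on a non-empty sequence, expressed via B's segmentation
theorem mvcFoldA_step (st : PySem.Set Int × List (Int × Int)) (seq : String)
    (hne : seq.toList ≠ []) :
    mvcFoldA st seq =
      (PySem.Set.add (PySem.Set.add st.1 (mvcSeg seq.toList).1)
         ((mvcSeg seq.toList).1 + (mvcSeg seq.toList).2 + 1),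
       st.2 ++ [((mvcSeg seq.toList).1, (mvcSeg seq.toList).1 + (mvcSeg seq.toList).2 + 1)]) := by
  rcases mvcStepA_seg seq.toList 0 with ⟨h1, h2⟩
  rw [zero_add] at h1
  simp [mvcFoldA, hne, h1, h2]

-- right_node is never negative
theorem mvcSeg_nonneg (cs : List Char) : 0 ≤ (mvcSeg cs).2 := by
  unfold mvcSeg
  cases hrest : cs.dropWhile (· == '0') with
  | nil => simp
  | cons a t =>
    simp only
    have hle : ((t.dropWhile (· == '0')).length : Int) ≤ (t.length : Int) := by
      exact_mod_cast t.length_dropWhile_le (· == '0')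
    omega

-- joint invariant of the two outer folds: A's edges equal B's edges, A's node set holds
-- exactly the edge endpoints, and every edge satisfies fst ≤ snd
theorem mvcFold_inv (seqs : List String) (nodes : PySem.Set Int) (edges : List (Int × Int))
    (hmem : ∀ x : Int, x ∈ nodes ↔ ∃ p ∈ edges, x = p.1 ∨ x = p.2)
    (hle : ∀ p ∈ edges, p.1 ≤ p.2) :
    (seqs.foldl mvcFoldA (nodes, edges)).2 = seqs.foldl mvcFoldB edges ∧
    (∀ x : Int, x ∈ (seqs.foldl mvcFoldA (nodes, edges)).1 ↔
      ∃ p ∈ (seqs.foldl mvcFoldA (nodes, edges)).2, x = p.1 ∨ x = p.2) ∧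
    (∀ p ∈ (seqs.foldl mvcFoldA (nodes, edges)).2, p.1 ≤ p.2) := by
  induction seqs generalizing nodes edges with
  | nil => exact ⟨rfl, hmem, hle⟩
  | cons s t ih =>
    by_cases hs : s.toList = []
    · simp only [List.foldl_cons]
      have hA : mvcFoldA (nodes, edges) s = (nodes, edges) := by simp [mvcFoldA, hs]
      have hB : mvcFoldB edges s = edges := by simp [mvcFoldB, hs]
      rw [hA, hB]
      exact ih nodes edges hmem hle
    · simp only [List.foldl_cons]
      rw [mvcFoldA_step (nodes, edges) s hs]
      have hB : mvcFoldB edges s =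
          edges ++ [((mvcSeg s.toList).1, (mvcSeg s.toList).1 + (mvcSeg s.toList).2 + 1)] := by
        simp [mvcFoldB, hs]
      rw [hB]
      apply ih
      · intro x
        simp only [PySem.Set.mem_add, hmem x, List.mem_append, List.mem_singleton]
        constructor
        · rintro ((⟨p, hp, hxp⟩ | h) | h)
          · exact ⟨p, Or.inl hp, hxp⟩
          · exact ⟨_, Or.inr rfl, Or.inl h⟩
          · exact ⟨_, Or.inr rfl, Or.inr h⟩
        · rintro ⟨p, hp | hp, hxp⟩
          · exact Or.inl (Or.inl ⟨p, hp, hxp⟩)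
          · subst hp
            rcases hxp with h | h
            · exact Or.inl (Or.inr h)
            · exact Or.inr h
      · intro p hp
        rcases List.mem_append.mp hp with h | h
        · exact hle p h
        · rcases List.mem_singleton.mp h with rfl
          have := mvcSeg_nonneg s.toList
          simp only
          omega

-- max? over id is determined by membership and mutual domination
theorem max?_congr_of_bounds (xs ys : List Int)
    (hnil : xs = [] ↔ ys = [])
    (h1 : ∀ x ∈ xs, ∃ y ∈ ys, x ≤ y)
    (h2 : ∀ y ∈ ys, ∃ x ∈ xs, y ≤ x) :
    PySem.List.max? xs (fun v => v) = PySem.List.max? ys (fun v => v) := by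
  cases hx : PySem.List.max? xs (fun v => v) with
  | none =>
    have hxe : xs = [] := (PySem.List.max?_eq_none_iff _ _).mp hx
    rw [(PySem.List.max?_eq_none_iff _ _).mpr (hnil.mp hxe)]
  | some m =>
    cases hy : PySem.List.max? ys (fun v => v) with
    | none =>
      have hye : ys = [] := (PySem.List.max?_eq_none_iff _ _).mp hy
      rw [hnil.mpr hye] at hx
      simp [PySem.List.max?] at hx
    | some n =>
      have hmx := PySem.List.max?_mem hx
      have hny := PySem.List.max?_mem hy
      have hmax_x := PySem.List.max?_isMax hx
      have hmax_y := PySem.List.max?_isMax hy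
      rcases h1 m hmx with ⟨y, hyy, hmy⟩
      rcases h2 n hny with ⟨x, hxx, hnx⟩
      rw [le_antisymm (le_trans hmy (hmax_y y hyy)) (le_trans hnx (hmax_x x hxx))]

-- ===== VERDICT (by name: the statement is the Claim_ definition above) =====
theorem multi_seqs_to_vertex_cover_spec : Claim_equal_multi_seqs_to_vertex_cover := by
  intro seqs _ _
  unfold Spec_multi_seqs_to_vertex_cover
  obtain ⟨hedges, hmem, hle⟩ :=
    mvcFold_inv seqs PySem.Set.empty [] (by simp [PySem.Set.empty]) (by simp)
  have hmax : PySem.List.max? (seqs.foldl mvcFoldA (PySem.Set.empty, [])).1 (fun v => v)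
      = PySem.List.max? ((seqs.foldl mvcFoldB []).map (fun p => p.2)) (fun v => v) := by
    apply max?_congr_of_bounds
    · constructor
      · intro h
        rw [List.map_eq_nil_iff]
        by_contra hne
        rcases List.exists_mem_of_ne_nil _ hne with ⟨p, hp⟩
        have : p.1 ∈ (seqs.foldl mvcFoldA (PySem.Set.empty, [])).1 :=
          (hmem p.1).mpr ⟨p, by rwa [hedges], Or.inl rfl⟩
        rw [h] at this
        simp at this
      · intro h
        rw [List.map_eq_nil_iff] at h
        by_contra hne
        rcases List.exists_mem_of_ne_nil _ hne with ⟨x, hx⟩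
        rcases (hmem x).mp hx with ⟨p, hp, _⟩
        rw [hedges, h] at hp
        simp at hp
    · intro x hx
      rcases (hmem x).mp hx with ⟨p, hp, hxp⟩
      rw [hedges] at hp
      refine ⟨p.2, List.mem_map.mpr ⟨p, hp, rfl⟩, ?_⟩
      rcases hxp with rfl | rfl
      · exact hle p (by rwa [hedges])
      · exact le_refl _
    · intro y hy
      rcases List.mem_map.mp hy with ⟨p, hp, rfl⟩
      exact ⟨p.2, (hmem p.2).mpr ⟨p, by rwa [hedges], Or.inr rfl⟩, le_refl _⟩
  show ((PySem.List.pyRange 0 ((PySem.List.max? (seqs.foldl mvcFoldA (PySem.Set.empty, [])).1 (fun v => v)).getD 0 + 1) 1).foldl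
          (fun acc i => acc ++ [PySem.Int.toStr i]) [],
        (seqs.foldl mvcFoldA (PySem.Set.empty, [])).2)
      = ((PySem.List.pyRange 0 ((PySem.List.max? ((seqs.foldl mvcFoldB []).map (fun p => p.2)) (fun v => v)).getD 0 + 1) 1).map PySem.Int.toStr,
        seqs.foldl mvcFoldB [])
  rw [hmax, hedges, PySem.List.foldl_append_singleton_eq_map]
  simp
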